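-- pv_equiv track=rewrite | github.com/sidhartthhhhh/Daily-Leet-Code- | 3967.py | decimalRepresentation
-- ===== SOURCE A (Python) =====
-- from typing import List
--
-- def decimalRepresentation(n: int) -> List[int]:
--     result = []
--     power_of_ten = 1
--
--     while n > 0:
--         digit = n % 10
--
--         if digit > 0:
--             component = digit * power_of_ten
--             result.append(component)
--
--         n = n // 10
--         power_of_ten *= 10
--
--     return result[::-1]
-- ===== SOURCE B (Python) =====
-- def decimalRepresentation(n: int) -> list[int]:
--     if n <= 0:
--         return []
--     # find the largest power of ten not exceeding n
--     p = 1
--     while p * 10 <= n: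
--         p *= 10
--     # scan digits most-significant-first; no reversal needed
--     result = []
--     while p > 0:
--         d = n // p % 10
--         if d > 0:
--             result.append(d * p)
--         p //= 10
--     return result
-- ===== Notes on version B (the rewrite author's own statement) =====
-- stated objective: alternative
-- what changed: B first finds the largest power of ten not exceeding n, then extracts each digit most-significant-first by floor-dividing by the current power, building the result in final order with no reversal, instead of A's least-significant-first destructive divmod loop followed by reversing the result.
import Mathlib
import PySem

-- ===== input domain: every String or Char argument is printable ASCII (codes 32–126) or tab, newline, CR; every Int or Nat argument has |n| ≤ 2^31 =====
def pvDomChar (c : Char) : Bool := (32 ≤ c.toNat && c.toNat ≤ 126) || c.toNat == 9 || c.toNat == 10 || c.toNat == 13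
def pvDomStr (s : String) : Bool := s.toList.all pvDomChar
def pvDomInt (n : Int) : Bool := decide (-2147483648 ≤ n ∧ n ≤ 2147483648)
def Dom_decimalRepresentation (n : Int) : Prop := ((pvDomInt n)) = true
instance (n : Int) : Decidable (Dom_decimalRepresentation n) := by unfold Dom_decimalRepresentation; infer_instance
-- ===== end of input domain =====

-- B scans digits most-significant-first from a precomputed largest power of ten (no final reversal),
-- where A peels digits least-significant-first and reverses; objective: alternative decomposition, same cost.

-- ===== PORT A =====
-- the 'while n > 0' loop of A: state (n, power_of_ten, result)
def pvALoop (n p : Int) (acc : List Int) : List Int :=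
  if _h : 0 < n then
    pvALoop (PySem.Int.floordiv n 10) (p * 10)
      (acc ++ (if 0 < PySem.Int.mod n 10 then [PySem.Int.mod n 10 * p] else []))
  else acc
termination_by n.toNat
decreasing_by
  have : PySem.Int.floordiv n 10 = n / 10 := PySem.Int.floordiv_eq_ediv_of_pos (by norm_num)
  rw [this]; omega

def decimalRepresentation (n : Int) : List Int := (pvALoop n 1 []).reverse

-- ===== PORT B =====
-- B's first loop: 'while p * 10 <= n: p *= 10'  (the 0 < p conjunct only makes the recursion total; p starts at 1)
def pvFindPow (n p : Int) : Int :=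
  if _h : 0 < p ∧ p * 10 ≤ n then pvFindPow n (p * 10) else p
termination_by (n - p).toNat
decreasing_by omega

-- B's second loop: 'while p > 0: d = n // p % 10; …; p //= 10'
def pvBLoop (n p : Int) (acc : List Int) : List Int :=
  if _h : 0 < p then
    pvBLoop n (PySem.Int.floordiv p 10)
      (acc ++ (if 0 < PySem.Int.mod (PySem.Int.floordiv n p) 10
               then [PySem.Int.mod (PySem.Int.floordiv n p) 10 * p] else []))
  else acc
termination_by p.toNat
decreasing_by
  have : PySem.Int.floordiv p 10 = p / 10 := PySem.Int.floordiv_eq_ediv_of_pos (by norm_num)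
  rw [this]; omega

def decimalRepresentation_alt (n : Int) : List Int :=
  if n ≤ 0 then [] else pvBLoop n (pvFindPow n 1) []

-- ===== PRECONDITION & SPEC =====
def Spec_decimalRepresentation (n : Int) (out : List Int) : Prop := out = decimalRepresentation_alt n
instance (n : Int) (out : List Int) : Decidable (Spec_decimalRepresentation n out) := by unfold Spec_decimalRepresentation; infer_instance

-- ===== CLAIM (what is proved, stated in full; the proofs are below) =====
def Claim_equal_decimalRepresentation : Prop := ∀ (n : Int), Dom_decimalRepresentation n → Spec_decimalRepresentation n (decimalRepresentation n)

-- ===== LEMMAS AND PROOFS =====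

lemma pv_fd10 (x : Int) : PySem.Int.floordiv x 10 = x / 10 :=
  PySem.Int.floordiv_eq_ediv_of_pos (by norm_num)

lemma pv_md10 (x : Int) : PySem.Int.mod x 10 = x % 10 :=
  PySem.Int.mod_eq_emod_of_pos (by norm_num)

lemma aLoop_nonpos (n p : Int) (acc : List Int) (h : ¬ 0 < n) : pvALoop n p acc = acc := by
  rw [pvALoop, dif_neg h]

-- the accumulator only prefixes the produced list
lemma aLoop_acc (m : Nat) : ∀ n p : Int, ∀ acc : List Int, n.toNat ≤ m →
    pvALoop n p acc = acc ++ pvALoop n p [] := by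
  induction m with
  | zero =>
    intro n p acc h
    have hn : ¬ 0 < n := by omega
    rw [aLoop_nonpos _ _ _ hn, aLoop_nonpos _ _ _ hn, List.append_nil]
  | succ m ih =>
    intro n p acc h
    by_cases hn : 0 < n
    · have hlt : (PySem.Int.floordiv n 10).toNat ≤ m := by rw [pv_fd10]; omega
      conv_lhs => rw [pvALoop]
      conv_rhs => rw [pvALoop]
      simp only [dif_pos hn]
      rw [ih _ _ _ hlt]
      conv_rhs => rw [ih _ _ _ hlt]
      simp [List.append_assoc]
    · rw [aLoop_nonpos _ _ _ hn, aLoop_nonpos _ _ _ hn, List.append_nil]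

lemma aLoop_acc' (n p : Int) (acc : List Int) : pvALoop n p acc = acc ++ pvALoop n p [] :=
  aLoop_acc n.toNat n p acc le_rfl

-- a single digit 0 ≤ d < 10
lemma aLoop_single (d p : Int) (h0 : 0 ≤ d) (h10 : d < 10) :
    pvALoop d p [] = if 0 < d then [d * p] else [] := by
  by_cases hd : 0 < d
  · rw [pvALoop, dif_pos hd, pv_md10, pv_fd10, Int.emod_eq_of_lt h0 h10,
      Int.ediv_eq_zero_of_lt h0 h10, if_pos hd,
      aLoop_nonpos 0 _ _ (by omega)]
    simp
  · rw [aLoop_nonpos _ _ _ hd]; simp [hd]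

-- splitting an argument at a power of ten splits the produced components
lemma aLoop_split : ∀ (k : Nat) (b c p : Int), 0 ≤ b → b < 10 ^ k → 0 ≤ c →
    pvALoop (b + c * 10 ^ k) p [] = pvALoop b p [] ++ pvALoop c (p * 10 ^ k) [] := by
  intro k
  induction k with
  | zero =>
    intro b c p hb0 hbk hc
    have hb : b = 0 := by omega
    subst hb
    simp [aLoop_nonpos 0 _ _ (by omega)]
  | succ k ih =>
    intro b c p hb0 hbk hc
    have hP : (0:Int) < 10 ^ (k+1) := by positivity
    by_cases ha : 0 < b + c * 10 ^ (k+1)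
    · have harw : b + c * 10 ^ (k+1) = b + (c * 10 ^ k) * 10 := by ring
      have hmd : (b + c * 10 ^ (k+1)) % 10 = b % 10 := by
        rw [harw, Int.add_mul_emod_self_right]
      have hfd : (b + c * 10 ^ (k+1)) / 10 = b / 10 + c * 10 ^ k := by
        rw [harw, Int.add_mul_ediv_right _ _ (by norm_num : (10:Int) ≠ 0)]
      rw [pvALoop, dif_pos ha, pv_md10, pv_fd10, hmd, hfd, aLoop_acc']
      have hb10 : b / 10 < 10 ^ k := by
        rw [Int.ediv_lt_iff_lt_mul (by norm_num)]
        calc b < 10 ^ (k+1) := hbk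
        _ = 10 ^ k * 10 := by ring
      rw [ih (b / 10) c (p * 10) (Int.ediv_nonneg hb0 (by norm_num)) hb10 hc]
      have hpow : p * 10 * 10 ^ k = p * 10 ^ (k+1) := by ring
      rw [hpow]
      by_cases hb : 0 < b
      · conv_rhs => rw [pvALoop]
        rw [dif_pos hb, pv_md10, pv_fd10]
        conv_rhs => rw [aLoop_acc' (b / 10)]
        simp [List.append_assoc]
      · have hb' : b = 0 := by omega
        subst hb'
        simp [aLoop_nonpos 0 _ _ (by omega)]
    · have hb' : b = 0 := by nlinarith
      have hc' : c = 0 := by nlinarith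
      subst hb'; subst hc'
      simp [aLoop_nonpos 0 _ _ (by omega)]

-- arithmetic: peeling the digit at P from n modulo 10*P
lemma pv_emod_split (n P : Int) (hP : 0 < P) :
    n % (10 * P) = n % P + (n / P % 10) * P := by
  have h1 : n % P + P * (n / P) = n := Int.emod_add_mul_ediv n P
  have h2 : n / P % 10 + 10 * (n / P / 10) = n / P := Int.emod_add_mul_ediv (n / P) 10
  have hr0 : 0 ≤ n % P := Int.emod_nonneg n hP.ne'
  have hrP : n % P < P := Int.emod_lt_of_pos n hP
  have hd0 : 0 ≤ n / P % 10 := Int.emod_nonneg _ (by norm_num)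
  have hd10 : n / P % 10 < 10 := Int.emod_lt_of_pos _ (by norm_num)
  have key : n = (n % P + n / P % 10 * P) + (10 * P) * (n / P / 10) := by
    nlinarith [h1, h2]
  have hXlt : n % P + n / P % 10 * P < 10 * P := by nlinarith
  have hX0 : 0 ≤ n % P + n / P % 10 * P := by nlinarith
  conv_lhs => rw [key]
  rw [mul_comm (10 * P) (n / P / 10), Int.add_mul_emod_self_right, Int.emod_eq_of_lt hX0 hXlt]

lemma bLoop_nonpos (n p : Int) (acc : List Int) (h : ¬ 0 < p) : pvBLoop n p acc = acc := by
  rw [pvBLoop, dif_neg h]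

lemma bLoop_eq (n : Int) : ∀ (k : Nat) (acc : List Int),
    pvBLoop n (10 ^ k) acc = acc ++ (pvALoop (n % 10 ^ (k+1)) 1 []).reverse := by
  intro k
  induction k with
  | zero =>
    intro acc
    have hd0 : 0 ≤ n % 10 := Int.emod_nonneg n (by norm_num)
    have hd10 : n % 10 < 10 := Int.emod_lt_of_pos n (by norm_num)
    rw [pvBLoop, dif_pos (by norm_num : (0:Int) < 10 ^ 0), pow_zero, pv_fd10 1,
      (by norm_num : (1:Int) / 10 = 0), bLoop_nonpos n 0 _ (by omega),
      PySem.Int.floordiv_eq_ediv_of_pos (by norm_num : (0:Int) < 1), Int.ediv_one, pv_md10,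
      pow_one, aLoop_single (n % 10) 1 hd0 hd10]
    by_cases hd : 0 < n % 10 <;> simp [hd]
  | succ k ih =>
    intro acc
    have hPk : (0:Int) < 10 ^ k := by positivity
    have hP : (0:Int) < 10 ^ (k+1) := by positivity
    have hd0 : 0 ≤ n / 10 ^ (k+1) % 10 := Int.emod_nonneg _ (by norm_num)
    have hd10 : n / 10 ^ (k+1) % 10 < 10 := Int.emod_lt_of_pos _ (by norm_num)
    rw [pvBLoop, dif_pos hP, pv_fd10 ((10:Int) ^ (k+1)),
      PySem.Int.floordiv_eq_ediv_of_pos hP, pv_md10]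
    have hp10 : (10:Int) ^ (k+1) / 10 = 10 ^ k := by
      rw [pow_succ, Int.mul_ediv_cancel _ (by norm_num : (10:Int) ≠ 0)]
    rw [hp10, ih]
    -- it remains to split off the top digit of n % 10 ^ (k+2)
    have hsplit : n % 10 ^ (k+2) = n % 10 ^ (k+1) + (n / 10 ^ (k+1) % 10) * 10 ^ (k+1) := by
      have := pv_emod_split n (10 ^ (k+1)) hP
      calc n % 10 ^ (k+2) = n % (10 * 10 ^ (k+1)) := by ring_nf
      _ = _ := this
    have hb0 : 0 ≤ n % 10 ^ (k+1) := Int.emod_nonneg n hP.ne'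
    have hbk : n % 10 ^ (k+1) < 10 ^ (k+1) := Int.emod_lt_of_pos n hP
    rw [hsplit, aLoop_split (k+1) _ _ 1 hb0 hbk hd0, one_mul,
      aLoop_single _ (10 ^ (k+1)) hd0 hd10]
    by_cases hd : 0 < n / 10 ^ (k+1) % 10 <;> simp [hd, List.append_assoc]

-- pvFindPow starting from a power of ten returns a power of ten bounding n
lemma findPow_spec (n : Int) : ∀ (p : Int) (k : Nat), p = 10 ^ k → p ≤ n →
    ∃ j : Nat, pvFindPow n p = 10 ^ j ∧ n < 10 * 10 ^ j := by
  intro p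
  induction p using pvFindPow.induct (n := n) with
  | case1 p h ih =>
    intro k hk _hn
    rw [pvFindPow, dif_pos h]
    exact ih (k + 1) (by rw [hk]; ring) h.2
  | case2 p h =>
    intro k hk hn
    refine ⟨k, by rw [pvFindPow, dif_neg h]; exact hk, ?_⟩
    have hp : 0 < p := by rw [hk]; positivity
    have hlt : n < p * 10 := by
      by_contra hge
      exact h ⟨hp, by omega⟩
    calc n < p * 10 := hlt
    _ = 10 * 10 ^ k := by rw [hk]; ring

-- ===== VERDICT (by name: the statement is the Claim_ definition above) =====
theorem decimalRepresentation_spec : Claim_equal_decimalRepresentation := by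
  intro n _
  unfold Spec_decimalRepresentation decimalRepresentation decimalRepresentation_alt
  by_cases hn : n ≤ 0
  · rw [if_pos hn, aLoop_nonpos n 1 [] (by omega)]; rfl
  · rw [if_neg hn]
    have hn' : 0 < n := by omega
    obtain ⟨j, hq, hbnd⟩ := findPow_spec n 1 0 (by norm_num) (by omega)
    rw [hq, bLoop_eq n j []]
    have hmod : n % 10 ^ (j+1) = n := by
      apply Int.emod_eq_of_lt (by omega)
      calc n < 10 * 10 ^ j := hbnd
      _ = 10 ^ (j+1) := by ring
    rw [hmod, List.nil_append]
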